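-- pv_equiv track=rewrite | github.com/TraGiang1002/Machine-Learning | AI-ML/HW1/Ex8.py | find_shortest_chain
-- ===== SOURCE A (Python) =====
-- def find_shortest_chain(words, start_word, end_word):
--     if len(start_word) != len(end_word):
--         return None
--
--     # Chỉ giữ lại các từ có độ dài lớn hơn hoặc bằng 3
--     words = [word for word in words if len(word) >= 3]
--
--     # Tạo một tập hợp chứa các từ đã sử dụng
--     used_words = set([start_word])
--
--     # Tạo một danh sách chứa các chuỗi ngắn nhất tìm được
--     shortest_chains = [[start_word]]
--
--     # Lặp lại cho đến khi tìm thấy chuỗi ngắn nhất hoặc không còn từ nào khả dụng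
--     while len(shortest_chains) > 0:
--         # Lấy chuỗi ngắn nhất trong danh sách
--         shortest_chain = shortest_chains.pop(0)
--
--         # Nếu từ cuối cùng trong chuỗi là từ kết thúc, trả lại chuỗi ngắn nhất
--         if shortest_chain[-1] == end_word:
--             return shortest_chain
--
--         # Lấy 2 chữ cái cuối cùng của từ cuối cùng trong chuỗi
--         last_two_chars = shortest_chain[-1][-2:]
--
--         # Lặp lại qua tất cả các từ trong tập hợp từ
--         for word in words:
--             # Nếu từ chưa được sử dụng và có cùng 2 chữ cái đầu tiên với 2 chữ cái cuối cùng của từ cuối cùng trong chuỗi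
--             if word not in used_words and word[:2] == last_two_chars:
--                 # Thêm từ vào tập hợp các từ đã sử dụng
--                 used_words.add(word)
--                 # Tạo một chuỗi mới bằng cách sao chép chuỗi ngắn nhất hiện tại và thêm từ mới vào
--                 new_chain = shortest_chain.copy()
--                 new_chain.append(word)
--                 # Thêm chuỗi mới vào danh sách các chuỗi ngắn nhất tìm được
--                 shortest_chains.append(new_chain)
--
--     return None
-- ===== SOURCE B (Python) =====
-- def find_shortest_chain(words, start_word, end_word):
--     if len(start_word) != len(end_word):
--         return None
--     # index the usable words (length >= 3) by their first two characters, once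
--     index = {}
--     for w in words:
--         if len(w) >= 3:
--             index.setdefault(w[:2], []).append(w)
--     used = {start_word}
--     # BFS over linked parent nodes (word, parent); head cursor instead of pop(0)
--     queue = [(start_word, None)]
--     i = 0
--     while i < len(queue):
--         node = queue[i]
--         i += 1
--         if node[0] == end_word:
--             chain = []
--             while node is not None:
--                 chain.append(node[0])
--                 node = node[1]
--             chain.reverse()
--             return chain
--         for w in index.get(node[0][-2:], ()):
--             if w not in used:
--                 used.add(w)
--                 queue.append((w, node))
--     return None
-- ===== Notes on version B (the rewrite author's own statement) =====
-- stated objective: faster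
-- what changed: B builds a dict indexing the usable words by their first-two-character prefix once, so each BFS expansion looks up only the matching bucket instead of scanning the whole word list, and replaces A's copied-chain queue entries by shared parent-pointer nodes with a head cursor instead of pop(0).
import Mathlib
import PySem

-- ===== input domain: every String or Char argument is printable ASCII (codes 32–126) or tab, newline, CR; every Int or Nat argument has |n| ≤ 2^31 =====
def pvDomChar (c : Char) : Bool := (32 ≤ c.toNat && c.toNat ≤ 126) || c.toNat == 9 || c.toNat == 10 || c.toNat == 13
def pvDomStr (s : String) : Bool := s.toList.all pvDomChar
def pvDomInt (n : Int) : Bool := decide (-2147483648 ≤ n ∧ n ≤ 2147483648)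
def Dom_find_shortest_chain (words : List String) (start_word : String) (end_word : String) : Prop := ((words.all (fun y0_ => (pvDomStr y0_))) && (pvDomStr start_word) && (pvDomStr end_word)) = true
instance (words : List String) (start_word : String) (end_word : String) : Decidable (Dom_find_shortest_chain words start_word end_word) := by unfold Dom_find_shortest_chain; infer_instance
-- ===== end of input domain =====

-- B replaces A's per-chain scan of the whole word list by a prefix index built once
-- (dict: first-two-chars -> words) and by parent-pointer BFS nodes; same return value.

-- ===== PORT A =====
-- inner 'for word in words:' loop body of A; state = (used_words, shortest_chains)
def pvAStep (chain : List String) (last_two : String) (s : PySem.Set String × List (List String)) (word : String) : PySem.Set String × List (List String) :=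
  if !(PySem.Set.contains s.1 word) && (PySem.Str.slice word none (some 2) == last_two) then
    (PySem.Set.add s.1 word, s.2 ++ [chain ++ [word]])
  else s

-- the 'while len(shortest_chains) > 0:' loop; fuel bounds the number of pops
-- (each pop was one enqueue, and each enqueue after the first adds a fresh word
-- to used_words, so pops ≤ words.length + 1: the fuel is never exhausted)
def pvALoop (words_f : List String) (end_word : String) : List (List String) → PySem.Set String → Nat → Option (List String)
  | _, _, 0 => none
  | [], _, _ => none
  | chain :: rest, used, fuel+1 =>
    if PySem.List.pyGetD chain (-1) "" == end_word then some chain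
    else
      let last_two := PySem.Str.slice (PySem.List.pyGetD chain (-1) "") (some (-2)) none
      let s := words_f.foldl (pvAStep chain last_two) (used, rest)
      pvALoop words_f end_word s.2 s.1 fuel

def find_shortest_chain (words : List String) (start_word : String) (end_word : String) : Option (List String) :=
  if PySem.Str.len start_word ≠ PySem.Str.len end_word then none
  else
    let words_f := words.filter (fun w => decide ((3:Int) ≤ PySem.Str.len w))
    pvALoop words_f end_word [[start_word]] (PySem.Set.ofList [start_word]) (words.length + 1)

-- ===== PORT B =====
-- index = { first two chars -> words with that prefix (length ≥ 3), in list order }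
def pvIndex (words : List String) : PySem.Dict String (List String) :=
  words.foldl
    (fun d w => if (3:Int) ≤ PySem.Str.len w then d.modify (PySem.Str.slice w none (some 2)) [] (· ++ [w]) else d)
    PySem.Dict.empty

-- inner 'for w in index.get(...):' loop body of B; a queue entry is a parent-linked
-- node (newest word first, ending at start_word), i.e. Python's (w, parent) tuples
def pvBStep (node : List String) (s : PySem.Set String × List (List String)) (w : String) : PySem.Set String × List (List String) :=
  if !(PySem.Set.contains s.1 w) then (PySem.Set.add s.1 w, s.2 ++ [w :: node]) else s

-- B's 'while i < len(queue):' cursor walk = consuming the queue front-to-back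
def pvBLoop (idx : PySem.Dict String (List String)) (end_word : String) : List (List String) → PySem.Set String → Nat → Option (List String)
  | _, _, 0 => none
  | [], _, _ => none
  | node :: rest, used, fuel+1 =>
    match node with
    | [] => none  -- unreachable: every enqueued node is nonempty
    | w :: _ =>
      if w == end_word then some node.reverse  -- walk the parent links, then reverse
      else
        let s := (PySem.Dict.getD idx (PySem.Str.slice w (some (-2)) none) []).foldl (pvBStep node) (used, rest)
        pvBLoop idx end_word s.2 s.1 fuel

def find_shortest_chain_alt (words : List String) (start_word : String) (end_word : String) : Option (List String) :=
  if PySem.Str.len start_word ≠ PySem.Str.len end_word then none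
  else pvBLoop (pvIndex words) end_word [[start_word]] (PySem.Set.ofList [start_word]) (words.length + 1)

-- ===== PRECONDITION & SPEC =====
def Spec_find_shortest_chain (words : List String) (start_word : String) (end_word : String) (out : Option (List String)) : Prop := out = find_shortest_chain_alt words start_word end_word
instance (words : List String) (start_word : String) (end_word : String) (out : Option (List String)) : Decidable (Spec_find_shortest_chain words start_word end_word out) := by unfold Spec_find_shortest_chain; infer_instance

-- ===== CLAIM (what is proved, stated in full; the proofs are below) =====
def Claim_equal_find_shortest_chain : Prop := ∀ (words : List String) (start_word : String) (end_word : String), Dom_find_shortest_chain words start_word end_word → Spec_find_shortest_chain words start_word end_word (find_shortest_chain words start_word end_word)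

-- ===== LEMMAS AND PROOFS =====

-- the bucket of the prefix index is exactly the (len ≥ 3 ∧ prefix) filter of words
lemma pvIndex_getD (l : List String) (d : PySem.Dict String (List String)) (p : String) :
    (l.foldl (fun d w => if (3:Int) ≤ PySem.Str.len w then d.modify (PySem.Str.slice w none (some 2)) [] (· ++ [w]) else d) d).getD p []
      = d.getD p [] ++ l.filter (fun w => decide ((3:Int) ≤ PySem.Str.len w) && (PySem.Str.slice w none (some 2) == p)) := by
  induction l generalizing d with
  | nil => simp
  | cons w l ih =>
    simp only [List.foldl_cons, List.filter_cons]
    by_cases h3 : (3:Int) ≤ PySem.Str.len w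
    · have h3' : 3 ≤ w.length := by simp [pysem] at h3; exact_mod_cast h3
      rw [if_pos h3, ih]
      by_cases hp : PySem.Str.slice w none (some 2) = p
      · simp [hp, h3']
      · rw [PySem.Dict.getD_modify, if_neg (Ne.symm hp)]
        simp [hp]
    · have h3' : ¬ 3 ≤ w.length := by
        simp [pysem] at h3; omega
      rw [if_neg h3, ih]
      simp [h3']

-- A's scan of words_f (condition: unused ∧ prefix = last_two) and B's scan of the
-- prefix bucket (condition: unused) compute the same used set and related queues
lemma pvFuse (node : List String) (lt : String) :
    ∀ (l : List String) (used : PySem.Set String) (qb : List (List String)),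
      (l.foldl (pvAStep node.reverse lt) (used, qb.map List.reverse)).1
        = ((l.filter (fun w => PySem.Str.slice w none (some 2) == lt)).foldl (pvBStep node) (used, qb)).1
      ∧ (l.foldl (pvAStep node.reverse lt) (used, qb.map List.reverse)).2
        = ((l.filter (fun w => PySem.Str.slice w none (some 2) == lt)).foldl (pvBStep node) (used, qb)).2.map List.reverse
      ∧ (∀ n ∈ ((l.filter (fun w => PySem.Str.slice w none (some 2) == lt)).foldl (pvBStep node) (used, qb)).2,
            n ∈ qb ∨ ∃ w, n = w :: node) := by
  intro l
  induction l with
  | nil =>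
    intro used qb
    exact ⟨rfl, rfl, fun n hn => Or.inl hn⟩
  | cons w l ih =>
    intro used qb
    by_cases hp : PySem.Str.slice w none (some 2) = lt
    · have hf : (List.filter (fun w => PySem.Str.slice w none (some 2) == lt) (w :: l))
          = w :: List.filter (fun w => PySem.Str.slice w none (some 2) == lt) l := by
        simp [hp]
      by_cases hc : w ∈ used
      · have hA : pvAStep node.reverse lt (used, qb.map List.reverse) w = (used, List.map List.reverse qb) := by
          simp [pvAStep, PySem.Set.contains, hc]
        have hB : pvBStep node (used, qb) w = (used, qb) := by
          simp [pvBStep, PySem.Set.contains, hc]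
        rw [hf]
        simp only [List.foldl_cons, hA, hB]
        exact ih used qb
      · have hA : pvAStep node.reverse lt (used, qb.map List.reverse) w
            = (PySem.Set.add used w, List.map List.reverse (qb ++ [w :: node])) := by
          simp [pvAStep, PySem.Set.contains, hc, hp]
        have hB : pvBStep node (used, qb) w = (PySem.Set.add used w, qb ++ [w :: node]) := by
          simp [pvBStep, PySem.Set.contains, hc]
        rw [hf]
        simp only [List.foldl_cons, hA, hB]
        obtain ⟨h1, h2, h3⟩ := ih (PySem.Set.add used w) (qb ++ [w :: node])
        refine ⟨h1, h2, fun n hn => ?_⟩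
        rcases h3 n hn with hn' | hw
        · rcases List.mem_append.1 hn' with h | h
          · exact Or.inl h
          · exact Or.inr ⟨w, by simpa using h⟩
        · exact Or.inr hw
    · have hf : (List.filter (fun w => PySem.Str.slice w none (some 2) == lt) (w :: l))
          = List.filter (fun w => PySem.Str.slice w none (some 2) == lt) l := by
        simp [hp]
      have hA : pvAStep node.reverse lt (used, qb.map List.reverse) w = (used, List.map List.reverse qb) := by
        simp [pvAStep, hp]
      rw [hf]
      simp only [List.foldl_cons, hA]
      exact ih used qb

-- the two BFS loops agree when A's queue is the element-wise reverse of B's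
lemma pvLoop_eq (words : List String) (end_word : String) :
    ∀ (fuel : Nat) (qb : List (List String)) (used : PySem.Set String),
      (∀ n ∈ qb, n ≠ []) →
      pvALoop (words.filter (fun w => decide ((3:Int) ≤ PySem.Str.len w))) end_word (qb.map List.reverse) used fuel
        = pvBLoop (pvIndex words) end_word qb used fuel := by
  intro fuel
  induction fuel with
  | zero => intro qb used _; cases qb <;> rfl
  | succ fuel ih =>
    intro qb used hne
    cases qb with
    | nil => rfl
    | cons node rest =>
      obtain ⟨w, par, rfl⟩ : ∃ w par, node = w :: par := by
        cases node with
        | nil => exact absurd rfl (hne [] (by simp))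
        | cons a b => exact ⟨a, b, rfl⟩
      simp only [List.map_cons, pvALoop, pvBLoop, List.reverse_cons,
        PySem.List.pyGetD_neg_one_append_singleton]
      by_cases hw : w = end_word
      · simp [hw]
      · simp only [beq_iff_eq, hw, if_false]
        have hbucket : PySem.Dict.getD (pvIndex words) (PySem.Str.slice w (some (-2)) none) []
            = (words.filter (fun v => decide ((3:Int) ≤ PySem.Str.len v))).filter
                (fun v => PySem.Str.slice v none (some 2) == PySem.Str.slice w (some (-2)) none) := by
          rw [pvIndex, pvIndex_getD, List.filter_filter]
          simp [Bool.and_comm]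
        obtain ⟨h1, h2, h3⟩ := pvFuse (w :: par) (PySem.Str.slice w (some (-2)) none)
          (words.filter (fun v => decide ((3:Int) ≤ PySem.Str.len v))) used rest
        rw [hbucket]
        simp only [List.reverse_cons] at h1 h2
        rw [h2, h1]
        apply ih
        intro n hn
        rcases h3 n hn with h | ⟨v, rfl⟩
        · exact hne n (by simp [h])
        · simp

-- ===== VERDICT (by name: the statement is the Claim_ definition above) =====
theorem find_shortest_chain_spec : Claim_equal_find_shortest_chain := by
  intro words start_word end_word _
  unfold Spec_find_shortest_chain find_shortest_chain find_shortest_chain_alt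
  by_cases h : PySem.Str.len start_word ≠ PySem.Str.len end_word
  · rw [if_pos h, if_pos h]
  · rw [if_neg h, if_neg h]
    have := pvLoop_eq words end_word (words.length + 1) [[start_word]] (PySem.Set.ofList [start_word]) (by simp)
    simpa using this
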